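-- pv_equiv track=rewrite | github.com/GalaxyXieyu/openclaw-coding-kit | skills/pm/scripts/pm_task_members.py | normalize_task_members
-- ===== SOURCE A (Python) =====
-- from typing import Any
--
-- def normalize_task_members(members: list[dict[str, Any]] | None = None) -> list[dict[str, str]]:
--     ordered_ids: list[str] = []
--     roles_by_id: dict[str, str] = {}
--
--     for item in members or []:
--         if not isinstance(item, dict):
--             continue
--         member_id = str(item.get("id") or "").strip()
--         if not member_id:
--             continue
--         role = str(item.get("role") or "assignee").strip().lower()
--         normalized_role = role if role in {"assignee", "follower"} else "assignee"
--         if member_id not in roles_by_id: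
--             ordered_ids.append(member_id)
--             roles_by_id[member_id] = normalized_role
--             continue
--         if normalized_role == "assignee":
--             roles_by_id[member_id] = "assignee"
--
--     return [{"id": member_id, "role": roles_by_id[member_id]} for member_id in ordered_ids]
-- ===== SOURCE B (Python) =====
-- from typing import Any
--
-- def normalize_task_members(members: list[dict[str, Any]] | None = None) -> list[dict[str, str]]:
--     # Stage 1: extract normalized (id, role) pairs, dropping non-dicts and empty ids.
--     entries = [(mid, str(item.get("role") or "assignee").strip().lower())
--                for item in (members or []) if isinstance(item, dict)
--                for mid in [str(item.get("id") or "").strip()] if mid]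
--     # Stage 2: first-occurrence order of ids.
--     order: list[str] = []
--     for mid, _ in entries:
--         if mid not in order:
--             order.append(mid)
--     # Stage 3: an id is an assignee iff any of its occurrences has a role other than 'follower'.
--     return [{"id": mid,
--              "role": "assignee" if any(r != "follower" for m, r in entries if m == mid)
--                      else "follower"}
--             for mid in order]
-- ===== Notes on version B (the rewrite author's own statement) =====
-- stated objective: alternative
-- what changed: A is one stateful pass mutating a per-id role dict with a conditional upgrade branch; B is staged: it first extracts the normalized (id, role) pairs, then dedups ids by order of first occurrence, and finally computes each id's role by scanning the pairs ('assignee' iff any occurrence's role is not 'follower'), keeping no per-id mutable role at all.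
import Mathlib
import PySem

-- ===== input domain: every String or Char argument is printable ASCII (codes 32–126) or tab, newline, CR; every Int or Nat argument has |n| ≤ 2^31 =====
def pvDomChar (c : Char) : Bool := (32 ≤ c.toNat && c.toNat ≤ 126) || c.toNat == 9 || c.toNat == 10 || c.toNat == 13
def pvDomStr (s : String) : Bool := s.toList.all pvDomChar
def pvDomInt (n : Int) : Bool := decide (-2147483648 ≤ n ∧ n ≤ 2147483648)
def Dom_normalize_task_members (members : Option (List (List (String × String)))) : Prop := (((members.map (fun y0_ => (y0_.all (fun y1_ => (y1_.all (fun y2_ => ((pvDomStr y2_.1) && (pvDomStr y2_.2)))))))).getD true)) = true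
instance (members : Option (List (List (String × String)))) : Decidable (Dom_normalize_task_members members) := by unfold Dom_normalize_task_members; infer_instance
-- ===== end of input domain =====

-- B replaces A's single stateful pass (mutable per-id role dict with a conditional upgrade branch)
-- by staged passes: extract normalized (id, role) pairs, dedup ids in first-occurrence order, then
-- compute each id's role by a scan over the pairs; objective: alternative (not claimed faster).

-- ===== PORT A =====
-- member_id = str(item.get("id") or "").strip()   ('or ""' : a missing key and an empty value both give "")
def pvAId (item : List (String × String)) : String :=
  PySem.Str.strip (((PySem.Dict.mk item).get? "id").getD "")

-- role = str(item.get("role") or "assignee").strip().lower()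
def pvARole (item : List (String × String)) : String :=
  let rv := ((PySem.Dict.mk item).get? "role").getD ""
  PySem.Str.lower (PySem.Str.strip (if rv = "" then "assignee" else rv))

-- normalized_role = role if role in {"assignee", "follower"} else "assignee"
def pvANorm (item : List (String × String)) : String :=
  let role := pvARole item
  if role = "assignee" ∨ role = "follower" then role else "assignee"

-- the body of A's for-loop over members (the isinstance check is vacuous: every item is a dict here)
def pvAStep (st : List String × PySem.Dict String String) (item : List (String × String)) :
    List String × PySem.Dict String String :=
  if pvAId item = "" then st
  else if (st.2.contains (pvAId item)) = false then
    (st.1 ++ [pvAId item], st.2.insert (pvAId item) (pvANorm item))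
  else if pvANorm item = "assignee" then
    (st.1, st.2.insert (pvAId item) "assignee")
  else st

def normalize_task_members (members : Option (List (List (String × String)))) : List (List (String × String)) :=
  let st := (members.getD []).foldl pvAStep ([], PySem.Dict.empty)
  -- roles_by_id[member_id]: every id in ordered_ids is a key, so the default "" is never used (exact)
  st.1.map (fun member_id => [("id", member_id), ("role", st.2.getD member_id "")])

-- ===== PORT B =====
-- stage 1, per item: [(mid, role)] for the normalized mid, role — [] when mid is empty
def pvBEntry (item : List (String × String)) : List (String × String) :=
  let mid := PySem.Str.strip (((PySem.Dict.mk item).get? "id").getD "")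
  if mid = "" then []
  else
    let rv := ((PySem.Dict.mk item).get? "role").getD ""
    [(mid, PySem.Str.lower (PySem.Str.strip (if rv = "" then "assignee" else rv)))]

-- stage 2: first-occurrence order of ids ('if mid not in order: order.append(mid)')
def pvBOrder (entries : List (String × String)) : List String :=
  entries.foldl (fun acc e => if e.1 ∈ acc then acc else acc ++ [e.1]) []

def normalize_task_members_alt (members : Option (List (List (String × String)))) : List (List (String × String)) :=
  let entries := (members.getD []).flatMap pvBEntry
  (pvBOrder entries).map (fun mid =>
    [("id", mid),
     ("role", if entries.any (fun e => e.1 == mid && !(e.2 == "follower")) then "assignee" else "follower")])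

-- ===== PRECONDITION & SPEC =====
def Spec_normalize_task_members (members : Option (List (List (String × String)))) (out : List (List (String × String))) : Prop := out = normalize_task_members_alt members
instance (members : Option (List (List (String × String)))) (out : List (List (String × String))) : Decidable (Spec_normalize_task_members members out) := by unfold Spec_normalize_task_members; infer_instance

-- ===== CLAIM (what is proved, stated in full; the proofs are below) =====
def Claim_equal_normalize_task_members : Prop := ∀ (members : Option (List (List (String × String)))), Dom_normalize_task_members members → Spec_normalize_task_members members (normalize_task_members members)

-- ===== LEMMAS AND PROOFS =====

-- the role B's stage 3 computes for an id
def pvRole (entries : List (String × String)) (mid : String) : String :=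
  if entries.any (fun e => e.1 == mid && !(e.2 == "follower")) then "assignee" else "follower"

lemma pvBEntry_eq (item : List (String × String)) :
    pvBEntry item = if pvAId item = "" then [] else [(pvAId item, pvARole item)] := rfl

lemma pvANorm_eq (item : List (String × String)) :
    pvANorm item = if pvARole item = "follower" then "follower" else "assignee" := by
  unfold pvANorm
  by_cases hf : pvARole item = "follower"
  · simp [hf]
  · by_cases ha : pvARole item = "assignee" <;> simp [ha, hf]

lemma mem_pvBOrder_foldl (l : List (String × String)) (acc : List String) (x : String) :
    x ∈ l.foldl (fun acc e => if e.1 ∈ acc then acc else acc ++ [e.1]) acc ↔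
      x ∈ acc ∨ x ∈ l.map Prod.fst := by
  induction l generalizing acc with
  | nil => simp
  | cons e rest ih =>
    by_cases h : e.1 ∈ acc
    · simp only [List.foldl_cons, if_pos h, ih, List.map_cons, List.mem_cons]
      have hin : x = e.1 → x ∈ acc := fun hx => hx ▸ h
      tauto
    · simp only [List.foldl_cons, if_neg h, ih, List.map_cons, List.mem_cons, List.mem_append]
      tauto

lemma mem_pvBOrder (l : List (String × String)) (x : String) :
    x ∈ pvBOrder l ↔ x ∈ l.map Prod.fst := by
  unfold pvBOrder; rw [mem_pvBOrder_foldl]; simp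

lemma pvBOrder_append_singleton (l : List (String × String)) (e : String × String) :
    pvBOrder (l ++ [e]) = if e.1 ∈ pvBOrder l then pvBOrder l else pvBOrder l ++ [e.1] := by
  unfold pvBOrder; rw [List.foldl_append]; rfl

lemma pvRole_append_singleton (l : List (String × String)) (e : String × String) (x : String) :
    pvRole (l ++ [e]) x =
      if x = e.1 ∧ e.2 ≠ "follower" then "assignee" else pvRole l x := by
  unfold pvRole
  rw [List.any_append]
  by_cases h1 : x = e.1
  · subst h1
    by_cases h2 : e.2 = "follower"
    · have hp : ([e].any fun e' => e'.1 == e.1 && !(e'.2 == "follower")) = false := by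
        simp [h2]
      rw [hp, Bool.or_false, if_neg (show ¬(e.1 = e.1 ∧ e.2 ≠ "follower") from fun hc => hc.2 h2)]
    · have hp : ([e].any fun e' => e'.1 == e.1 && !(e'.2 == "follower")) = true := by
        simp [h2]
      rw [hp, Bool.or_true, if_pos (show e.1 = e.1 ∧ e.2 ≠ "follower" from ⟨rfl, h2⟩)]
      simp
  · have hp : ([e].any fun e' => e'.1 == x && !(e'.2 == "follower")) = false := by
      simp [beq_eq_false_iff_ne.mpr (Ne.symm h1)]
    rw [hp, Bool.or_false, if_neg (show ¬(x = e.1 ∧ e.2 ≠ "follower") from fun hc => h1 hc.1)]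

-- the invariant: after folding A's loop over ms, ordered_ids is B's order list, the dict's keys are
-- exactly ordered_ids, and each stored role is the role B computes from the entry list of ms
def pvInvA (ms : List (List (String × String))) (sa : List String × PySem.Dict String String) : Prop :=
  sa.1 = pvBOrder (ms.flatMap pvBEntry) ∧
  (∀ x, sa.2.contains x = true ↔ x ∈ sa.1) ∧
  (∀ x ∈ sa.1, sa.2.getD x "" = pvRole (ms.flatMap pvBEntry) x)

set_option maxHeartbeats 1000000 in
lemma pvInvA_step (done : List (List (String × String))) (item : List (String × String))
    (sa : List String × PySem.Dict String String) (h : pvInvA done sa) :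
    pvInvA (done ++ [item]) (pvAStep sa item) := by
  obtain ⟨h1, h2, h3⟩ := h
  unfold pvInvA
  have hflat : (done ++ [item]).flatMap pvBEntry = done.flatMap pvBEntry ++ pvBEntry item := by
    rw [List.flatMap_append, List.flatMap_cons, List.flatMap_nil, List.append_nil]
  by_cases hid : pvAId item = ""
  · -- empty id: A skips, B's entry list is unchanged
    rw [show pvAStep sa item = sa from by unfold pvAStep; rw [if_pos hid]]
    rw [hflat, pvBEntry_eq, if_pos hid, List.append_nil]
    exact ⟨h1, h2, h3⟩
  · have hent : (done ++ [item]).flatMap pvBEntry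
        = done.flatMap pvBEntry ++ [(pvAId item, pvARole item)] := by
      rw [hflat, pvBEntry_eq, if_neg hid]
    by_cases hc : sa.2.contains (pvAId item) = true
    · -- duplicate id
      have hmem : pvAId item ∈ pvBOrder (done.flatMap pvBEntry) := h1 ▸ (h2 _).mp hc
      have horder : pvBOrder ((done ++ [item]).flatMap pvBEntry)
          = pvBOrder (done.flatMap pvBEntry) := by
        rw [hent, pvBOrder_append_singleton, if_pos hmem]
      by_cases hf : pvARole item = "follower"
      · -- follower occurrence: A leaves the state unchanged, the role scan is unaffected
        rw [show pvAStep sa item = sa from by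
              unfold pvAStep
              rw [if_neg hid, if_neg (by simp [hc]), if_neg (by rw [pvANorm_eq, if_pos hf]; decide)]]
        refine ⟨h1.trans horder.symm, h2, ?_⟩
        intro x hx
        rw [hent, pvRole_append_singleton, if_neg (by simp [hf]), h3 x hx]
      · -- non-follower occurrence: A upgrades the stored role, B's scan now finds it
        have hn : pvANorm item = "assignee" := by rw [pvANorm_eq, if_neg hf]
        rw [show pvAStep sa item = (sa.1, sa.2.insert (pvAId item) "assignee") from by
              unfold pvAStep; rw [if_neg hid, if_neg (by simp [hc]), if_pos hn]]
        refine ⟨h1.trans horder.symm, ?_, ?_⟩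
        · intro x
          rw [show (sa.1, sa.2.insert (pvAId item) "assignee").2
                = sa.2.insert (pvAId item) "assignee" from rfl, PySem.Dict.contains_insert]
          by_cases hx : x = pvAId item
          · subst hx; simpa using (h2 _).mp hc
          · simp [show (x == pvAId item) = false by simpa using hx, h2 x]
        · intro x hx
          rw [show (sa.1, sa.2.insert (pvAId item) "assignee").2
                = sa.2.insert (pvAId item) "assignee" from rfl,
              hent, pvRole_append_singleton]
          by_cases hxm : x = pvAId item
          · subst hxm
            rw [PySem.Dict.getD_insert_self, if_pos ⟨rfl, hf⟩]
          · rw [PySem.Dict.getD_insert, if_neg hxm, if_neg (by simp [hxm]), h3 x hx]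
    · -- fresh id
      have hc' : sa.2.contains (pvAId item) = false := by simpa using hc
      have hnm : pvAId item ∉ pvBOrder (done.flatMap pvBEntry) := fun hm =>
        absurd ((h2 _).mpr (h1 ▸ hm)) (by simp [hc'])
      have hnoent : (done.flatMap pvBEntry).any
          (fun e => e.1 == pvAId item && !(e.2 == "follower")) = false := by
        rw [List.any_eq_false]
        rintro e he hpe
        exact hnm ((mem_pvBOrder _ _).mpr
          (List.mem_map.mpr ⟨e, he, by simpa using (Bool.and_elim_left hpe : (e.1 == pvAId item) = true)⟩))
      have horder : pvBOrder ((done ++ [item]).flatMap pvBEntry)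
          = pvBOrder (done.flatMap pvBEntry) ++ [pvAId item] := by
        rw [hent, pvBOrder_append_singleton, if_neg hnm]
      rw [show pvAStep sa item
            = (sa.1 ++ [pvAId item], sa.2.insert (pvAId item) (pvANorm item)) from by
            unfold pvAStep; rw [if_neg hid, if_pos hc']]
      refine ⟨by rw [show (sa.1 ++ [pvAId item], sa.2.insert (pvAId item) (pvANorm item)).1
                = sa.1 ++ [pvAId item] from rfl, h1, horder], ?_, ?_⟩
      · intro x
        rw [show (sa.1 ++ [pvAId item], sa.2.insert (pvAId item) (pvANorm item)).2
              = sa.2.insert (pvAId item) (pvANorm item) from rfl, PySem.Dict.contains_insert]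
        by_cases hx : x = pvAId item
        · subst hx; simp
        · simp [show (x == pvAId item) = false by simpa using hx, h2 x, hx]
      · intro x hx
        rw [show (sa.1 ++ [pvAId item], sa.2.insert (pvAId item) (pvANorm item)).2
              = sa.2.insert (pvAId item) (pvANorm item) from rfl,
            hent, pvRole_append_singleton]
        by_cases hxm : x = pvAId item
        · subst hxm
          rw [PySem.Dict.getD_insert_self, pvANorm_eq]
          by_cases hf : pvARole item = "follower"
          · rw [if_pos hf, if_neg (by simp [hf]), pvRole, hnoent]; simp
          · rw [if_neg hf, if_pos ⟨rfl, hf⟩]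
        · have hx' : x ∈ (sa.1 ++ [pvAId item], sa.2.insert (pvAId item) (pvANorm item)).1 := hx
          have hx2 : x ∈ sa.1 := by
            rcases List.mem_append.mp hx' with h | h
            · exact h
            · exact absurd (List.mem_singleton.mp h) hxm
          rw [PySem.Dict.getD_insert, if_neg hxm, if_neg (by simp [hxm]), h3 x hx2]

lemma pvInvA_foldl (ms : List (List (String × String))) :
    pvInvA ms (ms.foldl pvAStep ([], PySem.Dict.empty)) := by
  induction ms using List.reverseRecOn with
  | nil =>
    refine ⟨rfl, ?_, ?_⟩ <;> intro x <;> simp [PySem.Dict.empty]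
  | append_singleton done item ih =>
    rw [List.foldl_append]
    exact pvInvA_step done item _ ih

-- ===== VERDICT (by name: the statement is the Claim_ definition above) =====
theorem normalize_task_members_spec : Claim_equal_normalize_task_members := by
  intro members _
  simp only [Spec_normalize_task_members, normalize_task_members, normalize_task_members_alt]
  obtain ⟨h1, h2, h3⟩ := pvInvA_foldl (members.getD [])
  rw [h1]
  apply List.map_congr_left
  intro x hx
  have hr := h3 x (h1 ▸ hx)
  rw [hr]
  rfl
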